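-- pv_equiv track=rewrite | github.com/alexandrethiault/GSA-ULTRA-2020-fastest-times | D6_Two_Quests.py | solution_
-- ===== SOURCE A (Python) =====
-- def solution_(a, b):
--     inf = 2000000001
--     dp0 = [[None]*(len(b)+1) for _ in range(len(a)+1)]
--     dp1 = [[None]*(len(b)+1) for _ in range(len(a)+1)]
--     dp0[0][0] = 0
--     dp0[1][0] = dp0[0][0] + a[0]
--     dp0[0][1] = inf
--     dp1[0][0] = 0
--     dp1[1][0] = inf
--     dp1[0][1] = dp1[0][0] + b[0]
--     for i in range(1, len(a)):
--         dp0[i+1][0] = dp0[i][0] + abs(a[i]-a[i-1])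
--         dp1[i+1][0] = inf
--     for j in range(1, len(b)):
--         dp0[0][j+1] = inf
--         dp1[0][j+1] = dp1[0][j] + abs(b[j]-b[j-1])
--     for i in range(len(a)):
--         for j in range(len(b)):
--             dp0[i+1][j+1] = min(
--                 dp0[i][j+1] + abs(a[i]-a[i-1]),
--                 dp1[i][j+1] + abs(a[i]-b[j])
--             )
--             dp1[i+1][j+1] = min(
--                 dp0[i+1][j] + abs(b[j]-a[i]),
--                 dp1[i+1][j] + abs(b[j]-b[j-1])
--             )
--     return min(dp0[len(a)][len(b)], dp1[len(a)][len(b)])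
-- ===== SOURCE B (Python) =====
-- def solution_(a, b):
--     inf = 2000000001
--     memo = {}
--
--     def g(i, j):
--         # g(i, j) = (dp0[i][j], dp1[i][j]) of the interleaving recurrence,
--         # computed on demand and cached.
--         if (i, j) in memo:
--             return memo[(i, j)]
--         if i == 0 and j == 0:
--             v = (0, 0)
--         elif j == 0:
--             p = g(i - 1, 0)
--             v = (p[0] + (a[0] if i == 1 else abs(a[i - 1] - a[i - 2])), inf)
--         elif i == 0:
--             q = g(0, j - 1)
--             v = (inf, q[1] + (b[0] if j == 1 else abs(b[j - 1] - b[j - 2])))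
--         else:
--             p = g(i - 1, j)
--             q = g(i, j - 1)
--             d0 = min(p[0] + abs(a[i - 1] - a[i - 2]),
--                      p[1] + abs(a[i - 1] - b[j - 1]))
--             d1 = min(q[0] + abs(b[j - 1] - a[i - 1]),
--                      q[1] + abs(b[j - 1] - b[j - 2]))
--             v = (d0, d1)
--         memo[(i, j)] = v
--         return v
--
--     r = g(len(a), len(b))
--     return min(r[0], r[1])
-- ===== Notes on version B (the rewrite author's own statement) =====
-- stated objective: alternative
-- what changed: B replaces A's bottom-up table fill (three boundary loops plus a nested i,j loop over two preallocated tables) by a top-down memoized recursion g(i,j) over pair states (dp0[i][j], dp1[i][j]) with a dict cache, evaluating cells on demand from the target state g(len(a),len(b)).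
-- crash fix: On empty a or b, A raises IndexError (it evaluates a[0] and b[0] unconditionally); B returns the cost of completing the non-empty quest alone (0 if both are empty). — e.g. on solution_([], [5]): A raises IndexError, B returns 5
import Mathlib
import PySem

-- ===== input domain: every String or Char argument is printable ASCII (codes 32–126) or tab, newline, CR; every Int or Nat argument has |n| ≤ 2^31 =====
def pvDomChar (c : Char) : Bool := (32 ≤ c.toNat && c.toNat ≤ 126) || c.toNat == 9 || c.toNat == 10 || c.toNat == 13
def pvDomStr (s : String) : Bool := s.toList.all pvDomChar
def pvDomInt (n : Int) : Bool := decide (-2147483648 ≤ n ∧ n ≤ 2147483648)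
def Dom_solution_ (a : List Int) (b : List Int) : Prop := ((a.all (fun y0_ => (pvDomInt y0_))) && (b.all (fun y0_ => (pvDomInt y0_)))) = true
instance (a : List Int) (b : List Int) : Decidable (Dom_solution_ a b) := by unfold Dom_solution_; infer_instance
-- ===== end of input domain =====

-- B evaluates the same recurrence top-down: a memoized recursion g(i,j) over pair states
-- (dp0[i][j], dp1[i][j]) with a dict cache, instead of A's bottom-up fill of two tables;
-- return-value equivalence is proved on non-empty a and b (A raises IndexError otherwise,
-- where B returns the single-quest cost).

-- xs[k] with Python index semantics (negative k counts from the end); used by both ports.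
-- The default 0 is never read on cells the claim depends on (indices are in range there).
def pvAv (xs : List Int) (k : Int) : Int := PySem.List.pyGetD xs k 0

-- ===== PORT A =====
-- A's dp0/dp1 tables are modelled as functions Nat → Nat → Int; writing dp[i][j] = v is pvUpd.
-- The initial None entries are represented by the default 0: A never reads an unwritten cell
-- on the inputs admitted by Pre_.
def pvUpd (d : Nat → Nat → Int) (i j : Nat) (v : Int) : Nat → Nat → Int :=
  fun i' j' => if i' = i ∧ j' = j then v else d i' j'

def pvA_init (a b : List Int) : ((Nat → Nat → Int) × (Nat → Nat → Int)) :=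
  let d0 : Nat → Nat → Int := fun _ _ => 0
  let d1 : Nat → Nat → Int := fun _ _ => 0
  let d0 := pvUpd d0 0 0 0
  let d0 := pvUpd d0 1 0 (d0 0 0 + pvAv a 0)
  let d0 := pvUpd d0 0 1 2000000001
  let d1 := pvUpd d1 0 0 0
  let d1 := pvUpd d1 1 0 2000000001
  let d1 := pvUpd d1 0 1 (d1 0 0 + pvAv b 0)
  (d0, d1)

-- for i in range(1, len(a)): dp0[i+1][0] = dp0[i][0] + abs(a[i]-a[i-1]); dp1[i+1][0] = inf
def pvA_step1 (a : List Int) (s : ((Nat → Nat → Int) × (Nat → Nat → Int))) (i : Nat) :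
    ((Nat → Nat → Int) × (Nat → Nat → Int)) :=
  (pvUpd s.1 (i+1) 0 (s.1 i 0 + |pvAv a i - pvAv a ((i:Int)-1)|), pvUpd s.2 (i+1) 0 2000000001)

-- for j in range(1, len(b)): dp0[0][j+1] = inf; dp1[0][j+1] = dp1[0][j] + abs(b[j]-b[j-1])
def pvA_step2 (b : List Int) (s : ((Nat → Nat → Int) × (Nat → Nat → Int))) (j : Nat) :
    ((Nat → Nat → Int) × (Nat → Nat → Int)) :=
  (pvUpd s.1 0 (j+1) 2000000001, pvUpd s.2 0 (j+1) (s.2 0 j + |pvAv b j - pvAv b ((j:Int)-1)|))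

-- body of the nested loop: dp0[i+1][j+1] then dp1[i+1][j+1] (which reads the fresh dp0)
def pvA_inner (a b : List Int) (i : Nat) (s : ((Nat → Nat → Int) × (Nat → Nat → Int))) (j : Nat) :
    ((Nat → Nat → Int) × (Nat → Nat → Int)) :=
  let u0 := pvUpd s.1 (i+1) (j+1)
      (min (s.1 i (j+1) + |pvAv a i - pvAv a ((i:Int)-1)|) (s.2 i (j+1) + |pvAv a i - pvAv b j|))
  let u1 := pvUpd s.2 (i+1) (j+1)
      (min (u0 (i+1) j + |pvAv b j - pvAv a i|) (s.2 (i+1) j + |pvAv b j - pvAv b ((j:Int)-1)|))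
  (u0, u1)

def pvA_outer (a b : List Int) (s : ((Nat → Nat → Int) × (Nat → Nat → Int))) (i : Nat) :
    ((Nat → Nat → Int) × (Nat → Nat → Int)) :=
  (List.range b.length).foldl (pvA_inner a b i) s

def solution_ (a : List Int) (b : List Int) : Int :=
  let s := pvA_init a b
  let s := (List.range' 1 (a.length - 1)).foldl (pvA_step1 a) s    -- range(1, len(a))
  let s := (List.range' 1 (b.length - 1)).foldl (pvA_step2 b) s    -- range(1, len(b))
  let s := (List.range a.length).foldl (pvA_outer a b) s
  min (s.1 a.length b.length) (s.2 a.length b.length)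

-- ===== PORT B =====
-- B's memoized recursive helper g(i, j): the dict cache 'memo' is threaded through the
-- recursion (looked up first; every computed value is inserted), exactly as Source B mutates it.
-- 'fuel' is only a structural totality guard: every call gets fuel > i + j, so the
-- fuel-0 branch is never reached and the recursion is exactly Source B's.
def pvB_g (a b : List Int) : Nat → Nat → Nat → PySem.Dict (Nat × Nat) (Int × Int) →
    (Int × Int) × PySem.Dict (Nat × Nat) (Int × Int)
  | 0, _, _, m => ((0, 0), m)
  | fuel+1, i, j, m =>
    match m.get? (i, j) with
    | some v => (v, m)
    | none =>
      if i = 0 ∧ j = 0 then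
        ((0, 0), m.insert (i, j) (0, 0))
      else if j = 0 then
        let r := pvB_g a b fuel (i-1) 0 m
        let v : Int × Int :=
          (r.1.1 + (if i = 1 then pvAv a 0 else |pvAv a ((i:Int)-1) - pvAv a ((i:Int)-2)|),
           2000000001)
        (v, r.2.insert (i, j) v)
      else if i = 0 then
        let r := pvB_g a b fuel 0 (j-1) m
        let v : Int × Int :=
          (2000000001,
           r.1.2 + (if j = 1 then pvAv b 0 else |pvAv b ((j:Int)-1) - pvAv b ((j:Int)-2)|))
        (v, r.2.insert (i, j) v)
      else
        let p := pvB_g a b fuel (i-1) j m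
        let q := pvB_g a b fuel i (j-1) p.2
        let d0 := min (p.1.1 + |pvAv a ((i:Int)-1) - pvAv a ((i:Int)-2)|)
                      (p.1.2 + |pvAv a ((i:Int)-1) - pvAv b ((j:Int)-1)|)
        let d1 := min (q.1.1 + |pvAv b ((j:Int)-1) - pvAv a ((i:Int)-1)|)
                      (q.1.2 + |pvAv b ((j:Int)-1) - pvAv b ((j:Int)-2)|)
        ((d0, d1), q.2.insert (i, j) (d0, d1))

def solution__alt (a : List Int) (b : List Int) : Int :=
  let r := (pvB_g a b (a.length + b.length + 1) a.length b.length PySem.Dict.empty).1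
  min r.1 r.2

-- ===== PRECONDITION & SPEC =====
-- Pre_ excludes exactly the inputs on which A raises IndexError: empty a or empty b
-- (A evaluates a[0] and b[0] unconditionally).
def Pre_solution_ (a : List Int) (b : List Int) : Prop := a ≠ [] ∧ b ≠ []
instance (a : List Int) (b : List Int) : Decidable (Pre_solution_ a b) := by
  unfold Pre_solution_; infer_instance

def pvWitness_solution_ : List Int × List Int := ([1, 5], [2])

-- On empty a or b, A raises IndexError (it evaluates a[0]/b[0] unconditionally);
-- B returns the cost of completing the non-empty quest alone (0 if both are empty).
def Raises_solution_ (a : List Int) (b : List Int) : Prop := a = [] ∨ b = []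
instance (a : List Int) (b : List Int) : Decidable (Raises_solution_ a b) := by
  unfold Raises_solution_; infer_instance
def pvRaiseWitness_solution_ : List Int × List Int := ([], [5])
def pvRaiseWitnessOut_solution_ : Int := 5

def Spec_solution_ (a : List Int) (b : List Int) (out : Int) : Prop := out = solution__alt a b
instance (a : List Int) (b : List Int) (out : Int) : Decidable (Spec_solution_ a b out) := by
  unfold Spec_solution_; infer_instance

-- ===== CLAIM (what is proved, stated in full; the proofs are below) =====
def Claim_equal_solution_ : Prop := ∀ (a : List Int) (b : List Int), Dom_solution_ a b → Pre_solution_ a b → Spec_solution_ a b (solution_ a b)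

def Claim_raises_solution_ : Prop := (∀ (a : List Int) (b : List Int), Dom_solution_ a b → Raises_solution_ a b → ¬ Pre_solution_ a b) ∧ (Dom_solution_ (pvRaiseWitness_solution_.1) (pvRaiseWitness_solution_.2) ∧ Raises_solution_ (pvRaiseWitness_solution_.1) (pvRaiseWitness_solution_.2) ∧ solution__alt (pvRaiseWitness_solution_.1) (pvRaiseWitness_solution_.2) = pvRaiseWitnessOut_solution_)

-- ===== LEMMAS AND PROOFS =====

-- the common specification: pvF a b t i j = dp{t}[i][j] of A's recurrence
def pvF (a b : List Int) : Bool → Nat → Nat → Int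
  | false, 0, 0 => 0
  | true, 0, 0 => 0
  | false, i+1, 0 =>
      pvF a b false i 0 + (if i = 0 then pvAv a 0 else |pvAv a i - pvAv a ((i:Int)-1)|)
  | true, _+1, 0 => 2000000001
  | false, 0, _+1 => 2000000001
  | true, 0, j+1 =>
      pvF a b true 0 j + (if j = 0 then pvAv b 0 else |pvAv b j - pvAv b ((j:Int)-1)|)
  | false, i+1, j+1 =>
      min (pvF a b false i (j+1) + |pvAv a i - pvAv a ((i:Int)-1)|)
          (pvF a b true i (j+1) + |pvAv a i - pvAv b j|)
  | true, i+1, j+1 =>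
      min (pvF a b false (i+1) j + |pvAv b j - pvAv a i|)
          (pvF a b true (i+1) j + |pvAv b j - pvAv b ((j:Int)-1)|)
  termination_by _t i j => i + j
  decreasing_by all_goals omega

-- pvF case equations in the exact shapes the invariant proofs need
lemma pvF_f00 (a b : List Int) : pvF a b false 0 0 = 0 := by simp [pvF]

lemma pvF_t00 (a b : List Int) : pvF a b true 0 0 = 0 := by simp [pvF]

lemma pvF_fs0 (a b : List Int) (i : Nat) :
    pvF a b false (i+1) 0 =
      pvF a b false i 0 + (if i = 0 then pvAv a 0 else |pvAv a i - pvAv a ((i:Int)-1)|) := by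
  rw [pvF]

lemma pvF_ts0 (a b : List Int) (i : Nat) : pvF a b true (i+1) 0 = 2000000001 := by
  rw [pvF]

lemma pvF_f0s (a b : List Int) (j : Nat) : pvF a b false 0 (j+1) = 2000000001 := by
  rw [pvF]

lemma pvF_t0s (a b : List Int) (j : Nat) :
    pvF a b true 0 (j+1) =
      pvF a b true 0 j + (if j = 0 then pvAv b 0 else |pvAv b j - pvAv b ((j:Int)-1)|) := by
  rw [pvF]

lemma pvF_fss (a b : List Int) (i j : Nat) :
    pvF a b false (i+1) (j+1) =
      min (pvF a b false i (j+1) + |pvAv a i - pvAv a ((i:Int)-1)|)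
          (pvF a b true i (j+1) + |pvAv a i - pvAv b j|) := by
  rw [pvF]

lemma pvF_tss (a b : List Int) (i j : Nat) :
    pvF a b true (i+1) (j+1) =
      min (pvF a b false (i+1) j + |pvAv b j - pvAv a i|)
          (pvF a b true (i+1) j + |pvAv b j - pvAv b ((j:Int)-1)|) := by
  rw [pvF]

-- ===== B side: the memoized recursion computes pvF =====

-- every value stored in the cache is the pvF pair of its key
def pvMemoGood (a b : List Int) (m : PySem.Dict (Nat × Nat) (Int × Int)) : Prop :=
  ∀ i j v, m.get? (i, j) = some v → v = (pvF a b false i j, pvF a b true i j)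

lemma pvMemoGood_insert (a b : List Int) (m : PySem.Dict (Nat × Nat) (Int × Int))
    (hm : pvMemoGood a b m) (i j : Nat) :
    pvMemoGood a b (m.insert (i, j) (pvF a b false i j, pvF a b true i j)) := by
  intro i' j' v hv
  rw [PySem.Dict.get?_insert] at hv
  split at hv
  · next h =>
      injection h with h1 h2
      subst h1; subst h2
      cases hv; rfl
  · exact hm i' j' v hv

lemma pvB_g_spec (a b : List Int) :
    ∀ fuel i j (m : PySem.Dict (Nat × Nat) (Int × Int)), i + j < fuel → pvMemoGood a b m →
      (pvB_g a b fuel i j m).1 = (pvF a b false i j, pvF a b true i j) ∧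
      pvMemoGood a b (pvB_g a b fuel i j m).2 := by
  intro fuel
  induction fuel with
  | zero => intro i j m hle; omega
  | succ n ih =>
      intro i j m hle hm
      show (match m.get? (i, j) with
            | some v => ((v, m) : (Int × Int) × PySem.Dict (Nat × Nat) (Int × Int))
            | none => _).1 = _ ∧ pvMemoGood a b (match m.get? (i, j) with
            | some v => ((v, m) : (Int × Int) × PySem.Dict (Nat × Nat) (Int × Int))
            | none => _).2
      cases hcase : m.get? (i, j) with
      | some v =>
          exact ⟨hm i j v hcase, hm⟩
      | none =>
          simp only
          by_cases hij : i = 0 ∧ j = 0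
          · obtain ⟨h1, h2⟩ := hij
            subst h1; subst h2
            rw [if_pos ⟨rfl, rfl⟩]
            refine ⟨by simp [pvF_f00, pvF_t00], ?_⟩
            simpa [pvF_f00, pvF_t00] using pvMemoGood_insert a b m hm 0 0
          · rw [if_neg hij]
            by_cases hj : j = 0
            · subst hj
              rw [if_pos rfl]
              obtain ⟨k, rfl⟩ : ∃ k, i = k + 1 := ⟨i - 1, by omega⟩
              obtain ⟨hrv, hrm⟩ := ih k 0 m (by omega) hm
              have hA1 : (((k+1 : Nat)) : Int) - 1 = ((k : Nat) : Int) := by omega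
              have hA2 : (((k+1 : Nat)) : Int) - 2 = ((k : Nat) : Int) - 1 := by omega
              have hv1 : (pvB_g a b n (k+1-1) 0 m).1.1 +
                    (if k + 1 = 1 then pvAv a 0
                     else |pvAv a ((((k+1) : Nat) : Int) - 1) - pvAv a ((((k+1) : Nat) : Int) - 2)|)
                  = pvF a b false (k+1) 0 := by
                rw [show k + 1 - 1 = k from rfl, hrv, pvF_fs0]
                by_cases h0 : k = 0
                · subst h0; simp
                · rw [if_neg (by omega), if_neg h0, hA1, hA2]
              have hpair : ((pvB_g a b n (k+1-1) 0 m).1.1 +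
                    (if k + 1 = 1 then pvAv a 0
                     else |pvAv a ((((k+1) : Nat) : Int) - 1) - pvAv a ((((k+1) : Nat) : Int) - 2)|),
                    (2000000001 : Int))
                  = (pvF a b false (k+1) 0, pvF a b true (k+1) 0) := by
                rw [Prod.mk.injEq]
                exact ⟨hv1, (pvF_ts0 a b k).symm⟩
              refine ⟨hpair, ?_⟩
              have hgood := pvMemoGood_insert a b _ hrm (k+1) 0
              rw [← hpair] at hgood
              exact hgood
            · by_cases hi : i = 0
              · subst hi
                rw [if_neg hj, if_pos rfl]
                obtain ⟨l, rfl⟩ : ∃ l, j = l + 1 := ⟨j - 1, by omega⟩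
                obtain ⟨hrv, hrm⟩ := ih 0 l m (by omega) hm
                have hB1 : (((l+1 : Nat)) : Int) - 1 = ((l : Nat) : Int) := by omega
                have hB2 : (((l+1 : Nat)) : Int) - 2 = ((l : Nat) : Int) - 1 := by omega
                have hv2 : (pvB_g a b n 0 (l+1-1) m).1.2 +
                      (if l + 1 = 1 then pvAv b 0
                       else |pvAv b ((((l+1) : Nat) : Int) - 1) - pvAv b ((((l+1) : Nat) : Int) - 2)|)
                    = pvF a b true 0 (l+1) := by
                  rw [show l + 1 - 1 = l from rfl, hrv, pvF_t0s]
                  by_cases h0 : l = 0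
                  · subst h0; simp
                  · rw [if_neg (by omega), if_neg h0, hB1, hB2]
                have hpair : (((2000000001 : Int)),
                      (pvB_g a b n 0 (l+1-1) m).1.2 +
                      (if l + 1 = 1 then pvAv b 0
                       else |pvAv b ((((l+1) : Nat) : Int) - 1) - pvAv b ((((l+1) : Nat) : Int) - 2)|))
                    = (pvF a b false 0 (l+1), pvF a b true 0 (l+1)) := by
                  rw [Prod.mk.injEq]
                  exact ⟨(pvF_f0s a b l).symm, hv2⟩
                refine ⟨hpair, ?_⟩
                have hgood := pvMemoGood_insert a b _ hrm 0 (l+1)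
                rw [← hpair] at hgood
                exact hgood
              · rw [if_neg hj, if_neg hi]
                obtain ⟨k, rfl⟩ : ∃ k, i = k + 1 := ⟨i - 1, by omega⟩
                obtain ⟨l, rfl⟩ : ∃ l, j = l + 1 := ⟨j - 1, by omega⟩
                obtain ⟨hpv, hpm⟩ := ih k (l+1) m (by omega) hm
                obtain ⟨hqv, hqm⟩ := ih (k+1) l (pvB_g a b n (k+1-1) (l+1) m).2 (by omega)
                  (by rw [show k + 1 - 1 = k from rfl]; exact hpm)
                have hA1 : (((k+1 : Nat)) : Int) - 1 = ((k : Nat) : Int) := by omega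
                have hA2 : (((k+1 : Nat)) : Int) - 2 = ((k : Nat) : Int) - 1 := by omega
                have hB1 : (((l+1 : Nat)) : Int) - 1 = ((l : Nat) : Int) := by omega
                have hB2 : (((l+1 : Nat)) : Int) - 2 = ((l : Nat) : Int) - 1 := by omega
                have hv0 : min ((pvB_g a b n (k+1-1) (l+1) m).1.1 +
                        |pvAv a ((((k+1) : Nat) : Int) - 1) - pvAv a ((((k+1) : Nat) : Int) - 2)|)
                      ((pvB_g a b n (k+1-1) (l+1) m).1.2 +
                        |pvAv a ((((k+1) : Nat) : Int) - 1) - pvAv b ((((l+1) : Nat) : Int) - 1)|)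
                    = pvF a b false (k+1) (l+1) := by
                  rw [show k + 1 - 1 = k from rfl, hpv, pvF_fss, hA1, hA2, hB1]
                have hv1 : min ((pvB_g a b n (k+1) (l+1-1) (pvB_g a b n (k+1-1) (l+1) m).2).1.1 +
                        |pvAv b ((((l+1) : Nat) : Int) - 1) - pvAv a ((((k+1) : Nat) : Int) - 1)|)
                      ((pvB_g a b n (k+1) (l+1-1) (pvB_g a b n (k+1-1) (l+1) m).2).1.2 +
                        |pvAv b ((((l+1) : Nat) : Int) - 1) - pvAv b ((((l+1) : Nat) : Int) - 2)|)
                    = pvF a b true (k+1) (l+1) := by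
                  rw [show l + 1 - 1 = l from rfl, hqv, pvF_tss, hB1, hB2, hA1]
                have hpair : ((min ((pvB_g a b n (k+1-1) (l+1) m).1.1 +
                        |pvAv a ((((k+1) : Nat) : Int) - 1) - pvAv a ((((k+1) : Nat) : Int) - 2)|)
                      ((pvB_g a b n (k+1-1) (l+1) m).1.2 +
                        |pvAv a ((((k+1) : Nat) : Int) - 1) - pvAv b ((((l+1) : Nat) : Int) - 1)|)),
                      (min ((pvB_g a b n (k+1) (l+1-1) (pvB_g a b n (k+1-1) (l+1) m).2).1.1 +
                        |pvAv b ((((l+1) : Nat) : Int) - 1) - pvAv a ((((k+1) : Nat) : Int) - 1)|)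
                      ((pvB_g a b n (k+1) (l+1-1) (pvB_g a b n (k+1-1) (l+1) m).2).1.2 +
                        |pvAv b ((((l+1) : Nat) : Int) - 1) - pvAv b ((((l+1) : Nat) : Int) - 2)|)))
                    = (pvF a b false (k+1) (l+1), pvF a b true (k+1) (l+1)) := by
                  rw [Prod.mk.injEq]
                  exact ⟨hv0, hv1⟩
                refine ⟨hpair, ?_⟩
                have hgood := pvMemoGood_insert a b _ hqm (k+1) (l+1)
                rw [← hpair] at hgood
                exact hgood

lemma pvB_final (a b : List Int) :
    solution__alt a b = min (pvF a b false a.length b.length) (pvF a b true a.length b.length) := by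
  have hempty : pvMemoGood a b PySem.Dict.empty := by
    intro i j v hv
    rw [PySem.Dict.get?_empty] at hv
    cases hv
  have h := (pvB_g_spec a b (a.length + b.length + 1) a.length b.length PySem.Dict.empty
    (by omega) hempty).1
  show min _ _ = _
  rw [h]

-- ===== A side: table invariants =====

lemma pvUpd_self (d : Nat → Nat → Int) (i j : Nat) (v : Int) : pvUpd d i j v i j = v := by
  simp [pvUpd]

lemma pvUpd_ne (d : Nat → Nat → Int) (i j : Nat) (v : Int) (i' j' : Nat)
    (h : ¬ (i' = i ∧ j' = j)) : pvUpd d i j v i' j' = d i' j' := by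
  simp only [pvUpd, if_neg h]

def pvColOK (a b : List Int) (s : (Nat → Nat → Int) × (Nat → Nat → Int)) : Prop :=
  ∀ i, i ≤ a.length → s.1 i 0 = pvF a b false i 0 ∧ s.2 i 0 = pvF a b true i 0

def pvRowOK (a b : List Int) (s : (Nat → Nat → Int) × (Nat → Nat → Int)) : Prop :=
  ∀ j, j ≤ b.length → s.1 0 j = pvF a b false 0 j ∧ s.2 0 j = pvF a b true 0 j

def pvFillOK (a b : List Int) (s : (Nat → Nat → Int) × (Nat → Nat → Int)) (k : Nat) : Prop :=
  ∀ i j, 1 ≤ i → i ≤ k → 1 ≤ j → j ≤ b.length →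
    s.1 i j = pvF a b false i j ∧ s.2 i j = pvF a b true i j

lemma pvA_col (a b : List Int) (k : Nat) :
    let s := (List.range' 1 k).foldl (pvA_step1 a) (pvA_init a b)
    (∀ i, i ≤ k + 1 → s.1 i 0 = pvF a b false i 0 ∧ s.2 i 0 = pvF a b true i 0) ∧
    (s.1 0 1 = pvF a b false 0 1 ∧ s.2 0 1 = pvF a b true 0 1) := by
  induction k with
  | zero =>
      refine ⟨?_, ?_, ?_⟩
      · intro i hi
        interval_cases i
        · exact ⟨by rw [pvF_f00]; rfl, by rw [pvF_t00]; rfl⟩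
        · constructor
          · show (0 : Int) + pvAv a 0 = _
            rw [show (1:Nat) = 0 + 1 from rfl, pvF_fs0, pvF_f00, if_pos rfl]
          · show (2000000001 : Int) = _
            rw [show (1:Nat) = 0 + 1 from rfl, pvF_ts0]
      · show (2000000001 : Int) = _
        rw [show (1:Nat) = 0 + 1 from rfl, pvF_f0s]
      · show (0 : Int) + pvAv b 0 = _
        rw [show (1:Nat) = 0 + 1 from rfl, pvF_t0s, pvF_t00, if_pos rfl]
  | succ k ih =>
      have hrange : List.range' 1 (k+1) = List.range' 1 k ++ [k+1] := by
        rw [List.range'_concat]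
        congr 1
        simp [Nat.add_comm]
      simp only at ih ⊢
      rw [hrange, List.foldl_append, List.foldl_cons, List.foldl_nil]
      set s := (List.range' 1 k).foldl (pvA_step1 a) (pvA_init a b) with hs
      obtain ⟨hcol, h01⟩ := ih
      refine ⟨?_, ?_, ?_⟩
      · intro i hi
        rcases Nat.lt_or_ge i (k+2) with h | h
        · have p1 : (pvA_step1 a s (k+1)).1 i 0 = s.1 i 0 := pvUpd_ne _ _ _ _ _ _ (by omega)
          have p2 : (pvA_step1 a s (k+1)).2 i 0 = s.2 i 0 := pvUpd_ne _ _ _ _ _ _ (by omega)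
          rw [p1, p2]
          exact hcol i (by omega)
        · have hi' : i = k + 2 := by omega
          subst hi'
          constructor
          · show pvUpd s.1 (k+1+1) 0 _ (k+1+1) 0 = pvF a b false (k+1+1) 0
            rw [pvUpd_self, (hcol (k+1) (by omega)).1, pvF_fs0 a b (k+1), if_neg (by omega)]
          · show pvUpd s.2 (k+1+1) 0 _ (k+1+1) 0 = pvF a b true (k+1+1) 0
            rw [pvUpd_self, pvF_ts0 a b (k+1)]
      · simp only [pvA_step1]
        rw [pvUpd_ne _ _ _ _ _ _ (by omega)]
        exact h01.1
      · simp only [pvA_step1]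
        rw [pvUpd_ne _ _ _ _ _ _ (by omega)]
        exact h01.2

lemma pvA_row (a b : List Int) (s0 : (Nat → Nat → Int) × (Nat → Nat → Int))
    (hcol : pvColOK a b s0)
    (h01 : s0.1 0 1 = pvF a b false 0 1 ∧ s0.2 0 1 = pvF a b true 0 1) (k : Nat) :
    let s := (List.range' 1 k).foldl (pvA_step2 b) s0
    pvColOK a b s ∧
    (∀ j, j ≤ k + 1 → s.1 0 j = pvF a b false 0 j ∧ s.2 0 j = pvF a b true 0 j) := by
  induction k with
  | zero =>
      refine ⟨hcol, ?_⟩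
      intro j hj
      interval_cases j
      · exact hcol 0 (Nat.zero_le _)
      · exact h01
  | succ k ih =>
      have hrange : List.range' 1 (k+1) = List.range' 1 k ++ [k+1] := by
        rw [List.range'_concat]
        congr 1
        simp [Nat.add_comm]
      simp only at ih ⊢
      rw [hrange, List.foldl_append, List.foldl_cons, List.foldl_nil]
      set s := (List.range' 1 k).foldl (pvA_step2 b) s0 with hs
      obtain ⟨hc, hr⟩ := ih
      refine ⟨?_, ?_⟩
      · intro i hi
        have p1 : (pvA_step2 b s (k+1)).1 i 0 = s.1 i 0 := pvUpd_ne _ _ _ _ _ _ (by omega)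
        have p2 : (pvA_step2 b s (k+1)).2 i 0 = s.2 i 0 := pvUpd_ne _ _ _ _ _ _ (by omega)
        rw [p1, p2]
        exact hc i hi
      · intro j hj
        rcases Nat.lt_or_ge j (k+2) with h | h
        · have p1 : (pvA_step2 b s (k+1)).1 0 j = s.1 0 j := pvUpd_ne _ _ _ _ _ _ (by omega)
          have p2 : (pvA_step2 b s (k+1)).2 0 j = s.2 0 j := pvUpd_ne _ _ _ _ _ _ (by omega)
          rw [p1, p2]
          exact hr j (by omega)
        · have hj' : j = k + 2 := by omega
          subst hj'
          constructor
          · show pvUpd s.1 0 (k+1+1) _ 0 (k+1+1) = pvF a b false 0 (k+1+1)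
            rw [pvUpd_self, pvF_f0s a b (k+1)]
          · show pvUpd s.2 0 (k+1+1) _ 0 (k+1+1) = pvF a b true 0 (k+1+1)
            rw [pvUpd_self, (hr (k+1) (by omega)).2, pvF_t0s a b (k+1), if_neg (by omega)]

lemma pvA_inner_spec (a b : List Int) (i : Nat) (hi : i < a.length)
    (s : (Nat → Nat → Int) × (Nat → Nat → Int))
    (hcol : pvColOK a b s) (hrow : pvRowOK a b s) (hfill : pvFillOK a b s i)
    (m : Nat) (hm : m ≤ b.length) :
    let t := (List.range m).foldl (pvA_inner a b i) s
    pvColOK a b t ∧ pvRowOK a b t ∧ pvFillOK a b t i ∧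
    (∀ j, 1 ≤ j → j ≤ m → t.1 (i+1) j = pvF a b false (i+1) j ∧
                          t.2 (i+1) j = pvF a b true (i+1) j) := by
  induction m with
  | zero =>
      exact ⟨hcol, hrow, hfill, by omega⟩
  | succ m ih =>
      have ihm := ih (by omega)
      simp only at ihm ⊢
      rw [List.range_succ, List.foldl_append, List.foldl_cons, List.foldl_nil]
      set t := (List.range m).foldl (pvA_inner a b i) s with hts
      obtain ⟨hc, hr, hf, hnew⟩ := ihm
      -- values read to write cell (i+1, m+1) of dp0
      have A0 : t.1 i (m+1) = pvF a b false i (m+1) := by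
        rcases Nat.eq_zero_or_pos i with h0 | h0
        · subst h0; exact (hr (m+1) (by omega)).1
        · exact (hf i (m+1) (by omega) (by omega) (by omega) (by omega)).1
      have A1 : t.2 i (m+1) = pvF a b true i (m+1) := by
        rcases Nat.eq_zero_or_pos i with h0 | h0
        · subst h0; exact (hr (m+1) (by omega)).2
        · exact (hf i (m+1) (by omega) (by omega) (by omega) (by omega)).2
      -- values read to write cell (i+1, m+1) of dp1
      have B0 : t.1 (i+1) m = pvF a b false (i+1) m := by
        rcases Nat.eq_zero_or_pos m with h0 | h0
        · subst h0; exact (hc (i+1) (by omega)).1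
        · exact (hnew m (by omega) (by omega)).1
      have B1 : t.2 (i+1) m = pvF a b true (i+1) m := by
        rcases Nat.eq_zero_or_pos m with h0 | h0
        · subst h0; exact (hc (i+1) (by omega)).2
        · exact (hnew m (by omega) (by omega)).2
      have hstep1 : (pvA_inner a b i t m).1 = pvUpd t.1 (i+1) (m+1)
          (min (t.1 i (m+1) + |pvAv a i - pvAv a ((i:Int)-1)|)
               (t.2 i (m+1) + |pvAv a i - pvAv b m|)) := rfl
      have hstep2 : (pvA_inner a b i t m).2 = pvUpd t.2 (i+1) (m+1)
          (min (pvUpd t.1 (i+1) (m+1)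
                  (min (t.1 i (m+1) + |pvAv a i - pvAv a ((i:Int)-1)|)
                       (t.2 i (m+1) + |pvAv a i - pvAv b m|)) (i+1) m + |pvAv b m - pvAv a i|)
               (t.2 (i+1) m + |pvAv b m - pvAv b ((m:Int)-1)|)) := rfl
      refine ⟨?_, ?_, ?_, ?_⟩
      · intro i' hi'
        rw [hstep1, hstep2, pvUpd_ne _ _ _ _ _ _ (by omega), pvUpd_ne _ _ _ _ _ _ (by omega)]
        exact hc i' hi'
      · intro j hj
        rw [hstep1, hstep2, pvUpd_ne _ _ _ _ _ _ (by omega), pvUpd_ne _ _ _ _ _ _ (by omega)]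
        exact hr j hj
      · intro i' j h1 h2 h3 h4
        rw [hstep1, hstep2, pvUpd_ne _ _ _ _ _ _ (by omega), pvUpd_ne _ _ _ _ _ _ (by omega)]
        exact hf i' j h1 h2 h3 h4
      · intro j h1 h2
        rcases Nat.lt_or_ge j (m+1) with h | h
        · rw [hstep1, hstep2, pvUpd_ne _ _ _ _ _ _ (by omega), pvUpd_ne _ _ _ _ _ _ (by omega)]
          exact hnew j h1 (by omega)
        · have hj' : j = m + 1 := by omega
          subst hj'
          constructor
          · rw [hstep1, pvUpd_self, A0, A1, pvF_fss]
          · rw [hstep2, pvUpd_self, pvUpd_ne _ _ _ _ _ _ (by omega), B0, B1, pvF_tss]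

lemma pvA_outer_spec (a b : List Int) (s2 : (Nat → Nat → Int) × (Nat → Nat → Int))
    (hcol : pvColOK a b s2) (hrow : pvRowOK a b s2) (k : Nat) (hk : k ≤ a.length) :
    let s := (List.range k).foldl (pvA_outer a b) s2
    pvColOK a b s ∧ pvRowOK a b s ∧ pvFillOK a b s k := by
  induction k with
  | zero =>
      exact ⟨hcol, hrow, by intro i j h1 h2 h3 h4; omega⟩
  | succ k ih =>
      have ihm := ih (by omega)
      simp only at ihm ⊢
      rw [List.range_succ, List.foldl_append, List.foldl_cons, List.foldl_nil]
      set s := (List.range k).foldl (pvA_outer a b) s2 with hs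
      obtain ⟨hc, hr, hf⟩ := ihm
      have h := pvA_inner_spec a b k (by omega) s hc hr hf b.length le_rfl
      simp only at h
      obtain ⟨hc', hr', hf', hnew'⟩ := h
      refine ⟨hc', hr', ?_⟩
      intro i j h1 h2 h3 h4
      rcases Nat.lt_or_ge i (k+1) with h | h
      · exact hf' i j h1 (by omega) h3 h4
      · have hi' : i = k + 1 := by omega
        subst hi'
        exact hnew' j h3 h4

lemma pvA_final (a b : List Int) (ha : a ≠ []) (hb : b ≠ []) :
    solution_ a b = min (pvF a b false a.length b.length) (pvF a b true a.length b.length) := by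
  have hla : 1 ≤ a.length := by
    cases a with
    | nil => exact absurd rfl ha
    | cons x xs => simp
  have hlb : 1 ≤ b.length := by
    cases b with
    | nil => exact absurd rfl hb
    | cons x xs => simp
  have h1 := pvA_col a b (a.length - 1)
  simp only at h1
  obtain ⟨hcol1, h011, h012⟩ := h1
  have hcol : pvColOK a b ((List.range' 1 (a.length - 1)).foldl (pvA_step1 a) (pvA_init a b)) := by
    intro i hi
    exact hcol1 i (by omega)
  have h2 := pvA_row a b _ hcol ⟨h011, h012⟩ (b.length - 1)
  simp only at h2
  obtain ⟨hcol2, hrow2⟩ := h2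
  have hrow : pvRowOK a b ((List.range' 1 (b.length - 1)).foldl (pvA_step2 b)
      ((List.range' 1 (a.length - 1)).foldl (pvA_step1 a) (pvA_init a b))) := by
    intro j hj
    exact hrow2 j (by omega)
  have h3 := pvA_outer_spec a b _ hcol2 hrow a.length le_rfl
  simp only at h3
  obtain ⟨_, _, hf⟩ := h3
  show min _ _ = _
  rw [(hf a.length b.length (by omega) le_rfl (by omega) le_rfl).1,
      (hf a.length b.length (by omega) le_rfl (by omega) le_rfl).2]

theorem solution__spec : Claim_equal_solution_ := by
  intro a b _ hpre
  obtain ⟨ha, hb⟩ := hpre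
  show solution_ a b = solution__alt a b
  rw [pvA_final a b ha hb, pvB_final a b]

@[simp] theorem solution__raises : Claim_raises_solution_ := by
  unfold Claim_raises_solution_
  exact ⟨by intro a b _ hr ⟨ha, hb⟩; rcases hr with h | h <;> simp_all, by decide⟩
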